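-- pv_equiv track=rewrite | github.com/Zzpecter/Codewars | AlphabetWarsAirstrike.py | bomb_da_field
-- ===== SOURCE A (Python) =====
-- def bomb_da_field(fight_list):
--     bomb = False
--
--     for index, tile in enumerate(fight_list):
--         if tile == '*' and not bomb:
--             bomb = True
--         elif tile != '*' and bomb:
--             fight_list[index] = '_'
--             bomb = False
--
--     for index, tile in enumerate(fight_list.__reversed__()):
--         if tile == '*' and not bomb:
--             bomb = True
--         elif tile != '*' and bomb:
--             fight_list[-index-1] = '_'
--             bomb = False
--     return ''.join(fight_list).replace('_', '')
-- ===== SOURCE B (Python) =====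
-- # One zip pass over (tile, left, right) neighbor triples instead of two stateful
-- # directional sweeps; mutates fight_list in place like A.
-- def bomb_da_field(fight_list):
--     res = ['_' if t != '*' and (l == '*' or r == '*') else t
--            for t, l, r in zip(fight_list, [None] + fight_list, fight_list[1:] + [None])]
--     fight_list[:] = res
--     return ''.join(res).replace('_', '')
-- ===== Notes on version B (the rewrite author's own statement) =====
-- stated objective: simpler
-- what changed: Replaces A's two stateful directional sweeps with a carried bomb flag by a single zip pass over (tile, left-neighbor, right-neighbor) triples that blanks any non-'*' tile adjacent to a '*'.
import Mathlib
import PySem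

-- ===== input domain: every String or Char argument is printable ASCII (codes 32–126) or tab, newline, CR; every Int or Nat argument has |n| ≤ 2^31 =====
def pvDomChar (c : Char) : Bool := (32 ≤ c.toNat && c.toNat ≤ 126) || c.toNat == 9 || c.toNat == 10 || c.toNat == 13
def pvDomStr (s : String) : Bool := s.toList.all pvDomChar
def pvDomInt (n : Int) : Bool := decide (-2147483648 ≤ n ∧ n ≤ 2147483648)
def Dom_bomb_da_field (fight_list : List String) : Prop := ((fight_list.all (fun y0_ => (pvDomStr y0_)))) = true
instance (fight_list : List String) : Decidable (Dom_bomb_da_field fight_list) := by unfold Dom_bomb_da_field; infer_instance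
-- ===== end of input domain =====

-- B replaces A's two stateful directional sweeps by one zip pass over neighbor triples;
-- both mutate the argument list in place identically, and the RETURN value is what is proved equal.

-- ===== PORT A =====
-- One pass of A's loop: structural recursion over the list carrying the bomb flag.
-- The write fight_list[index] = '_' targets exactly the element just read, so in the
-- recursion it is the replacement of the current head in the output list.
def bombPass (bomb : Bool) : List String → List String × Bool
  | [] => ([], bomb)
  | t :: rest =>
    if t = "*" ∧ bomb = false then
      let r := bombPass true rest; (t :: r.1, r.2)
    else if t ≠ "*" ∧ bomb = true then
      let r := bombPass false rest; ("_" :: r.1, r.2)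
    else
      let r := bombPass bomb rest; (t :: r.1, r.2)

def bomb_da_field (fight_list : List String) : String :=
  let p1 := bombPass false fight_list
  -- second loop: iterates fight_list.__reversed__() and writes fight_list[-index-1],
  -- i.e. exactly the element just yielded — the same pass on the reversed list, reversed back;
  -- the bomb flag is carried over from the first loop, as in the Python.
  let p2 := bombPass p1.2 p1.1.reverse
  PySem.Str.replace (PySem.Str.join "" p2.1.reverse) "_" ""

-- ===== PORT B =====
def bomb_da_field_alt (fight_list : List String) : String :=
  -- [None] + fight_list  /  fight_list[1:] + [None]  (zip truncates to the shortest list)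
  let left : List (Option String) := none :: fight_list.map some
  let right : List (Option String) := (fight_list.map some).tail ++ [none]
  let res := (fight_list.zip (left.zip right)).map
    (fun p => if p.1 ≠ "*" ∧ (p.2.1 = some "*" ∨ p.2.2 = some "*") then "_" else p.1)
  PySem.Str.replace (PySem.Str.join "" res) "_" ""

-- ===== PRECONDITION & SPEC =====
def Spec_bomb_da_field (fight_list : List String) (out : String) : Prop := out = bomb_da_field_alt fight_list
instance (fight_list : List String) (out : String) : Decidable (Spec_bomb_da_field fight_list out) := by unfold Spec_bomb_da_field; infer_instance

-- ===== CLAIM (what is proved, stated in full; the proofs are below) =====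
def Claim_equal_bomb_da_field : Prop := ∀ (fight_list : List String), Dom_bomb_da_field fight_list → Spec_bomb_da_field fight_list (bomb_da_field fight_list)

-- ===== LEMMAS AND PROOFS =====

-- pure characterisations of the two programs
def markL (p : Bool) : List String → List String
  | [] => []
  | t :: rest => (if t ≠ "*" ∧ p = true then "_" else t) :: markL (t == "*") rest

def lastB (p : Bool) : List String → Bool
  | [] => p
  | t :: rest => lastB (t == "*") rest

def markR : List String → List String
  | [] => []
  | t :: rest => (if t ≠ "*" ∧ rest.head? = some "*" then "_" else t) :: markR rest

def markB (prev : Option String) : List String → List String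
  | [] => []
  | t :: rest => (if t ≠ "*" ∧ (prev = some "*" ∨ rest.head? = some "*") then "_" else t) :: markB (some t) rest

lemma bombPass_eq (p : Bool) (l : List String) : bombPass p l = (markL p l, lastB p l) := by
  induction l generalizing p with
  | nil => rfl
  | cons t rest ih =>
    have hb : (t == "*") = decide (t = "*") := by by_cases h' : t = "*" <;> simp [h']
    by_cases ht : t = "*" <;> cases p <;>
      simp [bombPass, markL, lastB, ih, ht, hb]

lemma lastB_markL (p q : Bool) (l : List String) : lastB p (markL q l) = lastB p l := by
  induction l generalizing p q with
  | nil => rfl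
  | cons t rest ih =>
    have hb : (t == "*") = decide (t = "*") := by by_cases h' : t = "*" <;> simp [h']
    by_cases ht : t = "*" <;> by_cases hq : q = true <;>
      simp [markL, lastB, ih, ht, hq, hb]

lemma lastB_true_iff (p : Bool) (l : List String) :
    lastB p l = true ↔ (l.getLast? = some "*" ∨ (l = [] ∧ p = true)) := by
  induction l generalizing p with
  | nil => simp [lastB]
  | cons t rest ih =>
    cases rest with
    | nil => by_cases ht : t = "*" <;> simp [lastB, ht]
    | cons u v =>
      rw [lastB, ih]
      simp [List.getLast?_cons_cons]

lemma markL_head_irrel (b : Bool) (r : List String) (h : r.head? = some "*") :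
    markL b r = markL false r := by
  cases r with
  | nil => simp at h
  | cons t rest =>
    simp only [List.head?_cons, Option.some_inj] at h
    simp [markL, h]

lemma markL_append_singleton (p : Bool) (xs : List String) (t : String) :
    markL p (xs ++ [t]) = markL p xs ++ [if t ≠ "*" ∧ lastB p xs = true then "_" else t] := by
  induction xs generalizing p with
  | nil => simp [markL, lastB]
  | cons x xs ih => simp [markL, lastB, ih]

lemma markL_reverse (l : List String) : markL false l.reverse = (markR l).reverse := by
  induction l with
  | nil => rfl
  | cons t rest ih =>
    have hcond : (lastB false rest.reverse = true) ↔ (rest.head? = some "*") := by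
      rw [lastB_true_iff]
      cases rest <;> simp
    simp only [List.reverse_cons, markL_append_singleton, ih, markR]
    congr 1
    by_cases ht : t = "*" <;> by_cases hr : rest.head? = some "*" <;>
      simp [ht, hr, hcond]

lemma markL_head_star (q : Bool) (l : List String) :
    (markL q l).head? = some "*" ↔ l.head? = some "*" := by
  cases l with
  | nil => simp [markL]
  | cons t rest =>
    by_cases ht : t = "*" <;> by_cases hq : q = true <;>
      simp [markL, ht, hq]

lemma markR_markL (l : List String) (p : Bool) (prev : Option String)
    (h : p = true ↔ prev = some "*") : markR (markL p l) = markB prev l := by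
  induction l generalizing p prev with
  | nil => rfl
  | cons t rest =>
    rename_i ih
    have htail : markR (markL (t == "*") rest) = markB (some t) rest := by
      apply ih
      simp
    simp only [markL, markR, markB, htail]
    congr 1
    have hne : ("_" : String) ≠ "*" := by decide
    by_cases ht : t = "*"
    · simp [ht]
    · cases p with
      | false =>
        have hprev : ¬ prev = some "*" := fun hh => by
          have := h.mpr hh; simp at this
        by_cases hr : rest.head? = some "*" <;>
          simp [markL_head_star, ht, hprev, hr]
      | true =>
        have hprev : prev = some "*" := h.mp rfl
        by_cases hr : rest.head? = some "*" <;>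
          simp [markL_head_star, ht, hprev, hr, hne]

lemma zip_markB (l : List String) (prev : Option String) :
    ((l.zip ((prev :: l.map some).zip ((l.map some).tail ++ [none]))).map
      (fun p => if p.1 ≠ "*" ∧ (p.2.1 = some "*" ∨ p.2.2 = some "*") then "_" else p.1))
      = markB prev l := by
  induction l generalizing prev with
  | nil => rfl
  | cons t rest ih =>
    cases rest with
    | nil => simp [markB]
    | cons u v =>
      have hih := ih (some t)
      simp only [List.map_cons, List.tail_cons] at hih
      rw [markB]
      simp only [List.map_cons, List.tail_cons, List.cons_append, List.zip_cons_cons,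
        List.map_cons, hih]
      simp

-- ===== VERDICT (by name: the statement is the Claim_ definition above) =====
theorem bomb_da_field_spec : Claim_equal_bomb_da_field := by
  intro l _
  unfold Spec_bomb_da_field bomb_da_field bomb_da_field_alt
  dsimp only
  rw [zip_markB l none]
  simp only [bombPass_eq]
  have hmain : (markL (lastB false l) (markL false l).reverse).reverse = markB none l := by
    have hbase : markL false (markL false l).reverse = (markR (markL false l)).reverse :=
      markL_reverse _
    have hfix : markL (lastB false l) (markL false l).reverse
        = markL false (markL false l).reverse := by
      cases hb : lastB false l with
      | false => rfl
      | true =>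
        apply markL_head_irrel
        have : lastB false (markL false l) = true := by rw [lastB_markL]; exact hb
        rw [lastB_true_iff] at this
        rcases this with h | ⟨_, hfalse⟩
        · rw [List.head?_reverse]; exact h
        · exact absurd hfalse (by simp)
    rw [hfix, hbase, List.reverse_reverse]
    exact markR_markL l false none (by simp)
  rw [hmain]
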